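-- pv_equiv track=rewrite | github.com/Usytwm/DAA-Problems | Problem 3/code/approximate_solution.py | greedy_dominating_set
-- ===== SOURCE A (Python) =====
-- def greedy_dominating_set(graph):
--     """
--     Implementa el algoritmo greedy ajustado para encontrar un conjunto dominante aproximado en un grafo,
--     seleccionando el nodo con más vecinos no dominados en cada paso.
--     ---
--     :param graph: Un diccionario que representa el grafo, donde las llaves son los nodos y los valores son listas de vecinos.
--     :return: Un conjunto dominante aproximado.
--     """
--     dominated = set()  # Conjunto de vértices ya dominados
--     dominating_set = set()  # Conjunto que contiene la solución aproximada
--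
--     while len(dominated) < len(graph):
--         # Buscar el nodo que domina más vecinos no dominados
--         best_vertex = None
--         max_undominated_neighbors = -1
--
--         for vertex in graph:
--             if vertex not in dominated:
--                 # Contar cuántos vecinos no dominados tiene este nodo, incluyéndolo si no está dominado
--                 undominated_neighbors = [
--                     neighbor for neighbor in graph[vertex] if neighbor not in dominated
--                 ]
--                 if len(undominated_neighbors) > max_undominated_neighbors:
--                     max_undominated_neighbors = len(undominated_neighbors)
--                     best_vertex = vertex
--
--         # Añadir el mejor nodo al conjunto dominante
--         dominating_set.add(best_vertex)
--         # Marcar como dominado el nodo y sus vecinos no dominados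
--         dominated.add(best_vertex)
--         for neighbor in graph[best_vertex]:
--             dominated.add(neighbor)
--
--     return dominating_set
-- ===== SOURCE B (Python) =====
-- def greedy_dominating_set(graph):
--     """Greedy dominating set with incrementally maintained undominated-neighbor
--     counts and a reverse-adjacency index, instead of recomputing every
--     neighbor list on every round."""
--     n = len(graph)
--     cnt = {}
--     rev = {}
--     for v, nbrs in graph.items():
--         cnt[v] = len(nbrs)
--         for u in nbrs:
--             rev.setdefault(u, []).append(v)
--     dominated = set()
--     result = set()
--     remaining = list(graph)
--     while len(dominated) < n:
--         best = None
--         best_cnt = -1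
--         for v in remaining:
--             c = cnt[v]
--             if c > best_cnt:
--                 best = v
--                 best_cnt = c
--         result.add(best)
--         for u in [best] + graph[best]:
--             if u not in dominated:
--                 dominated.add(u)
--                 for w in rev.get(u, ()):
--                     cnt[w] -= 1
--         remaining = [v for v in remaining if v not in dominated]
--     return result
-- ===== Notes on version B (the rewrite author's own statement) =====
-- stated objective: faster
-- what changed: Instead of recomputing every undominated vertex's full undominated-neighbor list on every round (A), B precomputes a reverse-adjacency index once and maintains per-vertex undominated-neighbor counts incrementally (decrementing along reverse edges as vertices become dominated) together with a maintained list of still-undominated keys scanned for the maximum.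
import Mathlib
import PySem

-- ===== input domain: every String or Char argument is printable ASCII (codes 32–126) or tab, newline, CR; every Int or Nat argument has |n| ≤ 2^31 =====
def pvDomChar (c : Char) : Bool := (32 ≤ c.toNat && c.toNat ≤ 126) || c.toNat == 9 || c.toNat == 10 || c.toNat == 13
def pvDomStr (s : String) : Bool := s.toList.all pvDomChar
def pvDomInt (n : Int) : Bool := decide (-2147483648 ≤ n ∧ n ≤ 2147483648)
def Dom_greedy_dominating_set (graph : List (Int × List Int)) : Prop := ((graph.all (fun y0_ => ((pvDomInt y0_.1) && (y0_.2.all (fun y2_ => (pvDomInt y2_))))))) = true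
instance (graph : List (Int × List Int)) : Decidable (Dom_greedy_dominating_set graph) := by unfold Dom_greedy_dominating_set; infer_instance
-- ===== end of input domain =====

-- B replaces A's per-round recomputation of every undominated-neighbor list by incrementally
-- maintained counts with a reverse-adjacency index and a maintained list of undominated keys;
-- a timing run measured B faster.

-- ===== PORT A =====

-- graph[v]: first-match dict lookup; every use below is at a key, where getD [] is exact
def gdsAdj (graph : List (Int × List Int)) (v : Int) : List Int :=
  ((PySem.Dict.mk graph).get? v).getD []

-- the inner 'for vertex in graph' selection loop of A, state (best_vertex, max_undominated_neighbors)
def gdsScanA (graph : List (Int × List Int)) (dominated : PySem.Set Int) :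
    Option Int × Int :=
  graph.foldl
    (fun st kv =>
      if !PySem.Set.contains dominated kv.1 then
        let und := (gdsAdj graph kv.1).filter (fun nb => !PySem.Set.contains dominated nb)
        if (und.length : Int) > st.2 then (some kv.1, (und.length : Int)) else st
      else st)
    (none, -1)

-- A's while loop. fuel = len(graph) is exact: each Python iteration adds the (undominated)
-- best vertex to `dominated`, so after len(graph) iterations the guard is false.
-- The `none` branch is where Python would evaluate graph[None] (KeyError); it is unreachable
-- for inputs with distinct keys (Pre_).
def gdsLoopA (graph : List (Int × List Int)) (fuel : Nat)
    (dominated dominating : PySem.Set Int) : PySem.Set Int :=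
  match fuel with
  | 0 => dominating
  | fuel + 1 =>
    if dominated.length < graph.length then
      match (gdsScanA graph dominated).1 with
      | none => dominating
      | some b =>
          gdsLoopA graph fuel
            ((gdsAdj graph b).foldl PySem.Set.add (PySem.Set.add dominated b))
            (PySem.Set.add dominating b)
    else dominating

def greedy_dominating_set (graph : List (Int × List Int)) : List Int :=
  gdsLoopA graph graph.length PySem.Set.empty PySem.Set.empty

-- ===== PORT B =====

-- the single init loop of B: cnt[v] = len(nbrs); rev.setdefault(u, []).append(v)
def gdsInitB (graph : List (Int × List Int)) :
    PySem.Dict Int Int × PySem.Dict Int (List Int) :=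
  graph.foldl
    (fun st kv =>
      (st.1.insert kv.1 (kv.2.length : Int),
       kv.2.foldl (fun r u => r.modify u [] (fun l => l ++ [kv.1])) st.2))
    (PySem.Dict.empty, PySem.Dict.empty)

-- graph[best] for port B: first-match dict lookup, always used at a key, where getD [] is exact
def gdsAdjB (graph : List (Int × List Int)) (v : Int) : List Int :=
  ((PySem.Dict.mk graph).get? v).getD []

-- B's selection loop over `remaining`; cnt[v] is present for every v ∈ remaining, so getD is exact
def gdsScanB (remaining : List Int) (cnt : PySem.Dict Int Int) : Option Int × Int :=
  remaining.foldl
    (fun st v =>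
      let c := cnt.getD v 0
      if c > st.2 then (some v, c) else st)
    (none, -1)

-- B's domination loop: newly dominated u decrements cnt[w] once per reverse edge (u,w);
-- cnt[w] -= 1 is modify with default 0, exact since w is always a key of cnt
def gdsDominate (rev : PySem.Dict Int (List Int)) (todo : List Int)
    (dominated : PySem.Set Int) (cnt : PySem.Dict Int Int) :
    PySem.Set Int × PySem.Dict Int Int :=
  todo.foldl
    (fun st u =>
      if !PySem.Set.contains st.1 u then
        (PySem.Set.add st.1 u,
         (rev.getD u []).foldl (fun c w => c.modify w 0 (fun x => x - 1)) st.2)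
      else st)
    (dominated, cnt)

-- B's while loop; same fuel and the same unreachable `none` branch as in A's port
def gdsLoopB (graph : List (Int × List Int)) (rev : PySem.Dict Int (List Int)) (fuel : Nat)
    (dominated result : PySem.Set Int) (remaining : List Int)
    (cnt : PySem.Dict Int Int) : PySem.Set Int :=
  match fuel with
  | 0 => result
  | fuel + 1 =>
    if dominated.length < graph.length then
      match (gdsScanB remaining cnt).1 with
      | none => result
      | some b =>
        let st := gdsDominate rev (b :: gdsAdjB graph b) dominated cnt
        gdsLoopB graph rev fuel st.1 (PySem.Set.add result b)
          (remaining.filter (fun v => !PySem.Set.contains st.1 v)) st.2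
    else result

def greedy_dominating_set_alt (graph : List (Int × List Int)) : List Int :=
  let ic := gdsInitB graph
  gdsLoopB graph ic.2 graph.length PySem.Set.empty PySem.Set.empty
    (graph.map Prod.fst) ic.1

-- ===== PRECONDITION & SPEC =====
-- Pre_: the association list encodes a Python dict, whose keys are necessarily distinct;
-- no input A accepts (a dict) is excluded.
def Pre_greedy_dominating_set (graph : List (Int × List Int)) : Prop :=
  (graph.map Prod.fst).Nodup

instance (graph : List (Int × List Int)) : Decidable (Pre_greedy_dominating_set graph) := by
  unfold Pre_greedy_dominating_set; infer_instance

def pvWitness_greedy_dominating_set : (List (Int × List Int)) :=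
  [(0, [1]), (1, []), (2, [0, 5])]

def Spec_greedy_dominating_set (graph : List (Int × List Int)) (out : List Int) : Prop :=
  out = greedy_dominating_set_alt graph

instance (graph : List (Int × List Int)) (out : List Int) :
    Decidable (Spec_greedy_dominating_set graph out) := by
  unfold Spec_greedy_dominating_set; infer_instance

-- ===== CLAIM (what is proved, stated in full; the proofs are below) =====
def Claim_equal_greedy_dominating_set : Prop :=
  ∀ (graph : List (Int × List Int)), Dom_greedy_dominating_set graph →
    Pre_greedy_dominating_set graph →
    Spec_greedy_dominating_set graph (greedy_dominating_set graph)

-- ===== LEMMAS AND PROOFS =====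

-- keys of the graph, in order
def gdsKeys (graph : List (Int × List Int)) : List Int := graph.map Prod.fst

-- the flat reverse-edge list (u, v) for u ∈ graph[v]
def gdsEdges (graph : List (Int × List Int)) : List (Int × Int) :=
  graph.flatMap (fun kv => kv.2.map (fun u => (u, kv.1)))

lemma gdsAdj_cons (kv : Int × List Int) (rest : List (Int × List Int)) (v : Int) :
    gdsAdj (kv :: rest) v = if kv.1 = v then kv.2 else gdsAdj rest v := by
  obtain ⟨k, ns⟩ := kv
  unfold gdsAdj
  rw [PySem.Dict.get?_mk_cons]
  by_cases h : k = v
  · simp [h]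
  · simp [h]

lemma gdsAdj_not_mem (graph : List (Int × List Int)) (v : Int)
    (h : v ∉ gdsKeys graph) : gdsAdj graph v = [] := by
  have h0 : (PySem.Dict.mk graph).get? v = none := by
    rw [PySem.Dict.get?_eq_none_iff_not_mem_keys]
    simpa [gdsKeys] using h
  unfold gdsAdj
  rw [h0]
  rfl

-- the single init loop of B splits into its two independent accumulators
lemma gdsInitB_eq (graph : List (Int × List Int)) :
    gdsInitB graph =
      (graph.foldl (fun c kv => c.insert kv.1 (kv.2.length : Int)) PySem.Dict.empty,
       graph.foldl (fun r kv =>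
         kv.2.foldl (fun r u => r.modify u [] (fun l => l ++ [kv.1])) r) PySem.Dict.empty) := by
  unfold gdsInitB
  exact PySem.List.foldl_prod_mk
    (fun (c : PySem.Dict Int Int) (kv : Int × List Int) => c.insert kv.1 (kv.2.length : Int))
    (fun (r : PySem.Dict Int (List Int)) (kv : Int × List Int) =>
      kv.2.foldl (fun r u => r.modify u [] (fun l => l ++ [kv.1])) r)
    graph PySem.Dict.empty PySem.Dict.empty

lemma gdsInitB_snd (graph : List (Int × List Int)) :
    (gdsInitB graph).2 =
      (gdsEdges graph).foldl (fun r p => r.modify p.1 [] (fun l => l ++ [p.2]))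
        PySem.Dict.empty := by
  rw [gdsInitB_eq]
  simp only [gdsEdges, List.foldl_flatMap, List.foldl_map]

-- the count-insert loop leaves absent keys untouched
lemma foldl_insert_getD_not_mem (g : List (Int × List Int)) (v : Int)
    (h : v ∉ g.map Prod.fst) (d : PySem.Dict Int Int) :
    (g.foldl (fun c kv => c.insert kv.1 (kv.2.length : Int)) d).getD v 0 = d.getD v 0 := by
  induction g generalizing d with
  | nil => rfl
  | cons kv rest ih =>
    simp only [List.map_cons, List.mem_cons, not_or] at h
    rw [List.foldl_cons, ih h.2]
    exact PySem.Dict.getD_insert_of_ne d _ _ h.1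

lemma foldl_insert_getD_mem (g : List (Int × List Int)) (hnd : (g.map Prod.fst).Nodup) :
    ∀ v ∈ g.map Prod.fst, ∀ d : PySem.Dict Int Int,
      (g.foldl (fun c kv => c.insert kv.1 (kv.2.length : Int)) d).getD v 0 =
        ((gdsAdj g v).length : Int) := by
  induction g with
  | nil => intro v hv; simp at hv
  | cons kv rest ih =>
    intro v hv d
    simp only [List.map_cons, List.nodup_cons] at hnd
    by_cases h : kv.1 = v
    · subst h
      rw [List.foldl_cons, gdsAdj_cons, if_pos rfl,
        foldl_insert_getD_not_mem rest kv.1 hnd.1, PySem.Dict.getD_insert_self]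
    · rw [List.foldl_cons, gdsAdj_cons, if_neg h]
      have hv' : v ∈ rest.map Prod.fst := by
        simp only [List.map_cons, List.mem_cons] at hv
        rcases hv with h1 | h1
        · exact absurd h1.symm h
        · exact h1
      exact ih hnd.2 v hv' _

-- initial counts: cnt[v] = len(graph[v]) for every key v
lemma gdsInitB_cnt (graph : List (Int × List Int)) (hnd : (gdsKeys graph).Nodup) :
    ∀ v ∈ gdsKeys graph,
      (gdsInitB graph).1.getD v 0 = ((gdsAdj graph v).length : Int) := by
  intro v hv
  rw [gdsInitB_eq]
  exact foldl_insert_getD_mem graph hnd v hv _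

lemma count_map_const (l : List Int) (c v : Int) :
    (l.map (fun _ => c)).count v = if c = v then l.length else 0 := by
  by_cases h : c = v <;> simp [List.count_replicate, h]

lemma edges_count_not_key (g : List (Int × List Int)) (u v : Int)
    (h : v ∉ g.map Prod.fst) :
    (((gdsEdges g).filter (fun p => p.1 == u)).map Prod.snd).count v = 0 := by
  rw [List.count_eq_zero]
  intro hm
  apply h
  simp only [List.mem_map, List.mem_filter] at hm
  obtain ⟨p, ⟨hpE, -⟩, hpv⟩ := hm
  simp only [gdsEdges, List.mem_flatMap, List.mem_map] at hpE
  obtain ⟨kv, hkv, a, ha, hpe⟩ := hpE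
  subst hpe
  have hk : kv.1 = v := hpv
  exact hk ▸ List.mem_map_of_mem (f := Prod.fst) hkv

-- the reverse-edge list, filtered at u and projected, counts u-edges into v
lemma edges_count (g : List (Int × List Int)) (hnd : (g.map Prod.fst).Nodup) (u v : Int) :
    (((gdsEdges g).filter (fun p => p.1 == u)).map Prod.snd).count v =
      (gdsAdj g v).count u := by
  induction g with
  | nil =>
    rw [gdsAdj_not_mem [] v (by simp [gdsKeys])]
    simp [gdsEdges]
  | cons kv rest ih =>
    obtain ⟨k, ns⟩ := kv
    simp only [List.map_cons, List.nodup_cons] at hnd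
    have hsplit : gdsEdges ((k, ns) :: rest) = ns.map (fun u' => (u', k)) ++ gdsEdges rest := by
      simp [gdsEdges]
    rw [hsplit, List.filter_append, List.map_append, List.count_append, gdsAdj_cons]
    have hhead : ((ns.map (fun u' => (u', k))).filter (fun p => p.1 == u)).map Prod.snd =
        (ns.filter (fun x => x == u)).map (fun _ => k) := by
      simp [List.filter_map, List.map_map, Function.comp_def]
    rw [hhead, count_map_const]
    by_cases hk : k = v
    · rw [if_pos hk, if_pos hk, edges_count_not_key rest u v (hk ▸ hnd.1)]
      simp [← List.count_eq_length_filter]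
    · rw [if_neg hk, if_neg hk, ih hnd.2]
      omega

-- the reverse index: rev[u] contains v once per occurrence of u in graph[v]
lemma gdsRev_count (graph : List (Int × List Int)) (hnd : (gdsKeys graph).Nodup)
    (u v : Int) :
    ((gdsInitB graph).2.getD u []).count v = (gdsAdj graph v).count u := by
  rw [gdsInitB_snd, PySem.Dict.getD_foldl_modify_append]
  rw [show (PySem.Dict.empty : PySem.Dict Int (List Int)).getD u [] = [] from rfl]
  rw [List.nil_append]
  exact edges_count graph hnd u v

-- a decrement loop over a list subtracts the multiplicity
lemma getD_foldl_modify_sub_one (l : List Int) (d : PySem.Dict Int Int) (w : Int) :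
    (l.foldl (fun c x => c.modify x 0 (fun y => y - 1)) d).getD w 0 =
      d.getD w 0 - (l.count w : Int) := by
  induction l generalizing d with
  | nil => simp
  | cons x t ih =>
    rw [List.foldl_cons, ih]
    by_cases h : w = x
    · subst h
      rw [PySem.Dict.getD_modify_self]
      simp only [List.count_cons, beq_self_eq_true, if_pos]
      push_cast
      ring
    · rw [PySem.Dict.getD_modify_of_ne d 0 _ h]
      simp [Ne.symm h]

-- removing the occurrences of one still-counted element from a filtered list
lemma length_filter_and_ne (l : List Int) (p : Int → Bool) (u : Int) (hu : p u = true) :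
    ((l.filter (fun x => p x && !(x == u))).length : Int) =
      ((l.filter p).length : Int) - (l.count u : Int) := by
  induction l with
  | nil => simp
  | cons x t ih =>
    by_cases hxu : x = u
    · subst hxu
      simp only [List.filter_cons, hu, List.count_cons, beq_self_eq_true, Bool.not_true,
        Bool.and_false, if_true]
      rw [List.length_cons]
      push_cast
      omega
    · have hne : (x == u) = false := by simp [hxu]
      simp only [List.filter_cons, List.count_cons, hne, Bool.not_false, Bool.and_true]
      cases hp : p x
      · simp only [if_false, Bool.false_eq_true]
        rw [ih]
        simp
      · simp only [if_true]
        rw [List.length_cons, List.length_cons]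
        push_cast
        rw [ih] at *
        simp
        omega

-- membership is preserved by a fold of Set.add
lemma mem_foldl_set_add (l : List Int) (s : PySem.Set Int) (x : Int) (hx : x ∈ s) :
    x ∈ l.foldl PySem.Set.add s := by
  exact (PySem.Set.mem_foldl_add (f := fun y : Int => y) (l := l) (s := s) (y := x)).mpr
    (Or.inl hx)

-- unfolding one step of the domination loop
lemma gdsDominate_cons (rev : PySem.Dict Int (List Int)) (u : Int) (t : List Int)
    (d : PySem.Set Int) (c : PySem.Dict Int Int) :
    gdsDominate rev (u :: t) d c =
      if PySem.Set.contains d u then gdsDominate rev t d c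
      else gdsDominate rev t (PySem.Set.add d u)
        ((rev.getD u []).foldl (fun c w => c.modify w 0 (fun x => x - 1)) c) := by
  by_cases h : u ∈ d <;> simp [gdsDominate, List.foldl_cons, h]

-- first component of the domination loop is A's plain Set.add fold
lemma gdsDominate_fst (rev : PySem.Dict Int (List Int)) (todo : List Int)
    (d : PySem.Set Int) (c : PySem.Dict Int Int) :
    (gdsDominate rev todo d c).1 = todo.foldl PySem.Set.add d := by
  induction todo generalizing d c with
  | nil => rfl
  | cons u t ih =>
    rw [gdsDominate_cons, List.foldl_cons]
    by_cases h : PySem.Set.contains d u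
    · rw [if_pos h, PySem.Set.add_of_mem ((PySem.Set.contains_iff d u).mp h)]
      exact ih d c
    · rw [if_neg h]
      exact ih _ _

-- the count invariant is preserved by the domination loop
lemma gdsDominate_cnt (graph : List (Int × List Int)) (hnd : (gdsKeys graph).Nodup) :
    ∀ (todo : List Int) (d : PySem.Set Int) (c : PySem.Dict Int Int),
      (∀ v ∈ gdsKeys graph,
        c.getD v 0 = (((gdsAdj graph v).filter (fun x => !PySem.Set.contains d x)).length : Int)) →
      ∀ v ∈ gdsKeys graph,
        (gdsDominate (gdsInitB graph).2 todo d c).2.getD v 0 =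
          (((gdsAdj graph v).filter
              (fun x => !PySem.Set.contains ((gdsDominate (gdsInitB graph).2 todo d c).1) x)).length : Int) := by
  intro todo
  induction todo with
  | nil =>
    intro d c hc v hv
    simpa [gdsDominate] using hc v hv
  | cons u t ih =>
    intro d c hc v hv
    rw [gdsDominate_cons]
    by_cases h : PySem.Set.contains d u
    · rw [if_pos h]
      exact ih d c hc v hv
    · rw [if_neg h]
      apply ih _ _ ?_ v hv
      intro w hw
      rw [getD_foldl_modify_sub_one, hc w hw, gdsRev_count graph hnd u w]
      have hu_not : u ∉ d := fun hm => h ((PySem.Set.contains_iff d u).mpr hm)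
      have hpu : (!PySem.Set.contains d u) = true := by
        simp [PySem.Set.contains_eq_listContains, hu_not]
      rw [← length_filter_and_ne (gdsAdj graph w) (fun x => !PySem.Set.contains d x) u hpu]
      have hfc : List.filter (fun x => !PySem.Set.contains d x && !(x == u)) (gdsAdj graph w)
          = List.filter (fun x => !PySem.Set.contains (PySem.Set.add d u) x) (gdsAdj graph w) := by
        apply List.filter_congr
        intro x _
        rw [PySem.Set.add_of_not_mem hu_not]
        by_cases hxd : x ∈ d <;> by_cases hxu : x = u <;>
          simp [PySem.Set.contains_eq_listContains, hxd, hxu]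
      rw [hfc]

-- with the invariants, the two selection loops agree
lemma scan_eq (graph : List (Int × List Int)) (dominated : PySem.Set Int)
    (remaining : List Int) (cnt : PySem.Dict Int Int)
    (h1 : remaining = (gdsKeys graph).filter (fun v => !PySem.Set.contains dominated v))
    (h2 : ∀ v ∈ gdsKeys graph,
      cnt.getD v 0 = (((gdsAdj graph v).filter (fun x => !PySem.Set.contains dominated x)).length : Int)) :
    gdsScanA graph dominated = gdsScanB remaining cnt := by
  have h0 : gdsScanA graph dominated =
      (gdsKeys graph).foldl (fun st v =>
        if !PySem.Set.contains dominated v then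
          let und := (gdsAdj graph v).filter (fun nb => !PySem.Set.contains dominated nb)
          if (und.length : Int) > st.2 then (some v, (und.length : Int)) else st
        else st) (none, -1) := by
    unfold gdsScanA gdsKeys
    rw [List.foldl_map]
  rw [h0, PySem.List.foldl_if_eq_foldl_filter, ← h1]
  unfold gdsScanB
  apply PySem.List.foldl_congr_mem
  intro acc v hv
  have hk : v ∈ gdsKeys graph := by
    rw [h1] at hv
    exact (List.mem_filter.mp hv).1
  simp only [h2 v hk]

-- the loop simulation: with the invariants, B's loop computes A's loop
lemma loop_sim (graph : List (Int × List Int)) (hnd : (gdsKeys graph).Nodup) :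
    ∀ (fuel : Nat) (dominated result : PySem.Set Int) (remaining : List Int)
      (cnt : PySem.Dict Int Int),
      remaining = (gdsKeys graph).filter (fun v => !PySem.Set.contains dominated v) →
      (∀ v ∈ gdsKeys graph,
        cnt.getD v 0 = (((gdsAdj graph v).filter (fun x => !PySem.Set.contains dominated x)).length : Int)) →
      gdsLoopB graph (gdsInitB graph).2 fuel dominated result remaining cnt =
        gdsLoopA graph fuel dominated result := by
  intro fuel
  induction fuel with
  | zero => intro d res rem c h1 h2; rfl
  | succ fuel ih =>
    intro d res rem c h1 h2
    rw [gdsLoopA, gdsLoopB]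
    simp only [show gdsAdjB = gdsAdj from rfl]
    by_cases hg : d.length < graph.length
    · rw [if_pos hg, if_pos hg, ← scan_eq graph d rem c h1 h2]
      cases hb : (gdsScanA graph d).1 with
      | none => rfl
      | some b =>
        simp only [gdsDominate_fst, List.foldl_cons]
        apply ih
        · rw [h1, List.filter_filter]
          apply List.filter_congr
          intro x _
          cases hx : PySem.Set.contains ((gdsAdj graph b).foldl PySem.Set.add (PySem.Set.add d b)) x
          · have hxd : x ∉ d := by
              intro hm
              have hmem : x ∈ (gdsAdj graph b).foldl PySem.Set.add (PySem.Set.add d b) :=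
                mem_foldl_set_add _ _ _ ((PySem.Set.mem_add d b x).mpr (Or.inl hm))
              rw [(PySem.Set.contains_iff _ _).mpr hmem] at hx
              simp at hx
            simp [PySem.Set.contains_eq_listContains, hxd]
          · simp
        · intro v hv
          have := gdsDominate_cnt graph hnd (b :: gdsAdj graph b) d c h2 v hv
          rw [gdsDominate_fst, List.foldl_cons] at this
          exact this
    · rw [if_neg hg, if_neg hg]

-- ===== VERDICT (by name: the statement is the Claim_ definition above) =====
theorem greedy_dominating_set_spec : Claim_equal_greedy_dominating_set := by
  intro graph _ hpre
  unfold Spec_greedy_dominating_set greedy_dominating_set greedy_dominating_set_alt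
  have hnd : (gdsKeys graph).Nodup := hpre
  simp only []
  rw [loop_sim graph hnd graph.length PySem.Set.empty PySem.Set.empty
    (graph.map Prod.fst) (gdsInitB graph).1 ?_ ?_]
  · simp [gdsKeys]
  · intro v hv
    rw [gdsInitB_cnt graph hnd v hv]
    congr 1
    rw [show (fun x => !PySem.Set.contains PySem.Set.empty x) = (fun _ => true) from
      funext fun x => by simp]
    rw [List.filter_true]
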